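-- pv_equiv track=rewrite | github.com/adamjelkins/achievecx-consultant | backend/vendor_catalog.py | _score_volume_fit
-- ===== SOURCE A (Python) =====
-- def _volume_tier(volume_str: str) -> str:
--     """Map conversation answer to volume tier."""
--     v = (volume_str or "").lower()
--     if "50,000+" in v or "50000" in v:
--         return "enterprise"
--     elif "10,000" in v:
--         return "high"
--     elif "1,000" in v:
--         return "medium"
--     elif "under" in v:
--         return "low"
--     return "medium"
--
-- def _score_volume_fit(vendor: dict, volume_str: str) -> int:
--     """20 pts — does vendor's typical deployment match client volume?"""
--     client_tier  = _volume_tier(volume_str)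
--     vendor_tiers = vendor.get("volume_tiers", [])
--
--     if client_tier in vendor_tiers:
--         return 20
--     # Adjacent tiers get partial credit
--     tier_order = ["low", "medium", "high", "enterprise"]
--     try:
--         c_idx = tier_order.index(client_tier)
--         for tier in vendor_tiers:
--             if tier in tier_order:
--                 v_idx = tier_order.index(tier)
--                 if abs(c_idx - v_idx) == 1:
--                     return 12
--     except ValueError:
--         pass
--     return 5
-- ===== SOURCE B (Python) =====
-- def _volume_tier(volume_str: str) -> str:
--     """Map conversation answer to volume tier."""
--     v = (volume_str or "").lower()
--     if "50,000+" in v or "50000" in v: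
--         return "enterprise"
--     elif "10,000" in v:
--         return "high"
--     elif "1,000" in v:
--         return "medium"
--     elif "under" in v:
--         return "low"
--     return "medium"
--
-- def _score_volume_fit(vendor: dict, volume_str: str) -> int:
--     """20 pts — probe the client tier and its neighbours against the vendor's tier set."""
--     tier_order = ["low", "medium", "high", "enterprise"]
--     c = tier_order.index(_volume_tier(volume_str))
--     have = set(vendor.get("volume_tiers", []))
--     if tier_order[c] in have:
--         return 20
--     if any(t in have for t in tier_order[c - 1:c] + tier_order[c + 1:c + 2]):
--         return 12
--     return 5
-- ===== Notes on version B (the rewrite author's own statement) =====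
-- stated objective: simpler
-- what changed: Inverts the traversal: instead of scanning the vendor's tier list testing each entry's index distance, B builds the vendor tiers into a set once and makes a constant number of membership probes (the client tier, then its at-most-two neighbouring tiers taken by slicing tier_order) against that set.
import Mathlib
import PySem

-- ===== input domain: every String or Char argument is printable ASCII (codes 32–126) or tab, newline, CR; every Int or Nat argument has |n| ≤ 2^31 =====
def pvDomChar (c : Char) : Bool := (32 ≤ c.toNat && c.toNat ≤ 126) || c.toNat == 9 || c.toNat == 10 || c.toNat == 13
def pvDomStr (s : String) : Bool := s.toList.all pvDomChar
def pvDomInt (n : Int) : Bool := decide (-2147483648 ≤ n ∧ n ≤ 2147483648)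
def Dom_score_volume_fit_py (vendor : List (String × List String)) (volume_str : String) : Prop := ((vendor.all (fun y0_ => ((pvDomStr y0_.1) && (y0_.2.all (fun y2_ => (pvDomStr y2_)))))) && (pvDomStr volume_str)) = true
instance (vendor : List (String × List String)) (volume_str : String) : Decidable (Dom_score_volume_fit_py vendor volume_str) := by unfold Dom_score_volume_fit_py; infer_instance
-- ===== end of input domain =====

-- B inverts the traversal: instead of scanning the vendor tier list for an adjacent index, it builds the vendor tiers into a set once and probes the client tier and its (at most two) neighbouring tiers against that set (simpler decomposition, same cost).

-- ===== PORT A =====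
-- shared helper: _volume_tier (identical in Source A and Source B)
def volume_tier_py (volume_str : String) : String :=
  -- (volume_str or "") = volume_str for strings ("" is the only falsy string)
  let v := PySem.Str.lower volume_str
  if PySem.Str.isIn "50,000+" v || PySem.Str.isIn "50000" v then "enterprise"
  else if PySem.Str.isIn "10,000" v then "high"
  else if PySem.Str.isIn "1,000" v then "medium"
  else if PySem.Str.isIn "under" v then "low"
  else "medium"

def tier_order_py : List String := ["low", "medium", "high", "enterprise"]

-- A's for-loop: 'if tier in tier_order' then index and test adjacency (index? = some ↔ membership)
def score_adj_loop (l : List String) (c_idx : Nat) : Int :=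
  match l with
  | [] => 5
  | t :: ts =>
    match PySem.List.index? tier_order_py t with
    | none => score_adj_loop ts c_idx
    | some v_idx => if ((c_idx : Int) - (v_idx : Int)).natAbs = 1 then 12 else score_adj_loop ts c_idx

def score_volume_fit_py (vendor : List (String × List String)) (volume_str : String) : Int :=
  let client_tier := volume_tier_py volume_str
  let vendor_tiers := PySem.Dict.getD (PySem.Dict.mk vendor) "volume_tiers" []
  if client_tier ∈ vendor_tiers then 20
  else
    -- try: tier_order.index(client_tier) … except ValueError: pass; return 5
    match PySem.List.index? tier_order_py client_tier with
    | none => 5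
    | some c_idx => score_adj_loop vendor_tiers c_idx

-- ===== PORT B =====
def score_volume_fit_py_alt (vendor : List (String × List String)) (volume_str : String) : Int :=
  -- c = tier_order.index(_volume_tier(volume_str)); always succeeds, so getD 0 is never the default
  let c : Nat := (PySem.List.index? tier_order_py (volume_tier_py volume_str)).getD 0
  -- have = set(vendor.get("volume_tiers", []))
  let haveS : PySem.Set String :=
    PySem.Set.ofList (PySem.Dict.getD (PySem.Dict.mk vendor) "volume_tiers" [])
  -- tier_order[c] (in range, so the default is never taken)
  if PySem.Set.contains haveS ((PySem.List.pyGet? tier_order_py (c : Int)).getD "") then 20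
  -- any(t in have for t in tier_order[c-1:c] + tier_order[c+1:c+2])
  else if (PySem.List.slice tier_order_py (some ((c : Int) - 1)) (some (c : Int)) ++
           PySem.List.slice tier_order_py (some ((c : Int) + 1)) (some ((c : Int) + 2))).any
            (fun t => PySem.Set.contains haveS t) then 12
  else 5

-- ===== PRECONDITION & SPEC =====
def Spec_score_volume_fit_py (vendor : List (String × List String)) (volume_str : String) (out : Int) : Prop := out = score_volume_fit_py_alt vendor volume_str
instance (vendor : List (String × List String)) (volume_str : String) (out : Int) : Decidable (Spec_score_volume_fit_py vendor volume_str out) := by unfold Spec_score_volume_fit_py; infer_instance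

-- ===== CLAIM (what is proved, stated in full; the proofs are below) =====
def Claim_equal_score_volume_fit_py : Prop := ∀ (vendor : List (String × List String)) (volume_str : String), Dom_score_volume_fit_py vendor volume_str → Spec_score_volume_fit_py vendor volume_str (score_volume_fit_py vendor volume_str)

-- ===== LEMMAS AND PROOFS =====

theorem volume_tier_mem (s : String) : volume_tier_py s ∈ tier_order_py := by
  unfold volume_tier_py
  dsimp only
  split_ifs <;> simp [tier_order_py]

-- is t a tier adjacent to index c? (the condition A's loop body tests)
def nbrB (c : Nat) (t : String) : Bool :=
  match PySem.List.index? tier_order_py t with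
  | none => false
  | some v => decide (((c : Int) - (v : Int)).natAbs = 1)

-- A's loop returns 12 iff some vendor tier passes the adjacency test, else 5
theorem score_adj_loop_eq (l : List String) (c : Nat) :
    score_adj_loop l c = if l.any (nbrB c) then 12 else 5 := by
  induction l with
  | nil => simp [score_adj_loop]
  | cons t ts ih =>
    show (match PySem.List.index? tier_order_py t with
          | none => score_adj_loop ts c
          | some v => if ((c : Int) - (v : Int)).natAbs = 1 then 12 else score_adj_loop ts c) = _
    rcases h : PySem.List.index? tier_order_py t with _ | v
    · have hb : nbrB c t = false := by unfold nbrB; rw [h]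
      simp [List.any_cons, hb, ih]
    · by_cases h1 : ((c : Int) - (v : Int)).natAbs = 1
      · have hb : nbrB c t = true := by unfold nbrB; rw [h]; simpa using h1
        simp [List.any_cons, hb, h1]
      · have hb : nbrB c t = false := by unfold nbrB; rw [h]; simpa using h1
        simp [List.any_cons, hb, h1, ih]

-- B's neighbour list for client index c
def nbrs (c : Nat) : List String :=
  PySem.List.slice tier_order_py (some ((c : Int) - 1)) (some (c : Int)) ++
  PySem.List.slice tier_order_py (some ((c : Int) + 1)) (some ((c : Int) + 2))

-- the adjacency test holds exactly for the neighbour strings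
theorem nbrB_eq_mem_nbrs {c : Nat} (hc : c < 4) (t : String) :
    nbrB c t = decide (t ∈ nbrs c) := by
  by_cases hm : t ∈ tier_order_py
  · simp only [tier_order_py, List.mem_cons, List.not_mem_nil, or_false] at hm
    interval_cases c <;> rcases hm with rfl | rfl | rfl | rfl <;> decide
  · have hn : PySem.List.index? tier_order_py t = none :=
      (PySem.List.index?_eq_none_iff ..).mpr hm
    have hnb : t ∉ nbrs c := by
      intro hx
      apply hm
      rcases List.mem_append.mp hx with hx | hx <;>
        exact PySem.List.mem_of_mem_slice _ _ _ hx
    have hb : nbrB c t = false := by unfold nbrB; rw [hn]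
    simp [hb, hnb]

theorem any_mem_comm (xs ys : List String) :
    xs.any (fun x => decide (x ∈ ys)) = ys.any (fun y => decide (y ∈ xs)) := by
  rw [← Bool.coe_iff_coe]
  simp only [List.any_eq_true, decide_eq_true_iff]
  exact ⟨fun ⟨a, h1, h2⟩ => ⟨a, h2, h1⟩, fun ⟨a, h1, h2⟩ => ⟨a, h2, h1⟩⟩

-- ===== VERDICT (by name: the statement is the Claim_ definition above) =====
theorem score_volume_fit_py_spec : Claim_equal_score_volume_fit_py := by
  intro vendor volume_str _
  unfold Spec_score_volume_fit_py score_volume_fit_py score_volume_fit_py_alt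
  rcases h : PySem.List.index? tier_order_py (volume_tier_py volume_str) with _ | c
  · exact absurd (volume_tier_mem volume_str) ((PySem.List.index?_eq_none_iff ..).mp h)
  · obtain ⟨hc, hct, -⟩ := PySem.List.getElem_of_index?_eq_some h
    have hc4 : c < 4 := by simpa [tier_order_py] using hc
    set l := PySem.Dict.getD (PySem.Dict.mk vendor) "volume_tiers" [] with hl
    simp only [h, Option.getD_some]
    have hget : (PySem.List.pyGet? tier_order_py (c : Int)).getD "" = volume_tier_py volume_str := by
      rw [PySem.List.pyGet?_natCast, List.getElem?_eq_getElem hc, Option.getD_some, hct]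
    rw [hget]
    have hcontains : ∀ x, PySem.Set.contains (PySem.Set.ofList l) x = decide (x ∈ l) := by
      intro x
      by_cases hx : x ∈ l
      · rw [(PySem.Set.contains_iff ..).mpr ((PySem.Set.mem_ofList ..).mpr hx)]
        simp [hx]
      · have hf : PySem.Set.contains (PySem.Set.ofList l) x = false := by
          rcases Bool.eq_false_or_eq_true (PySem.Set.contains (PySem.Set.ofList l) x) with hb | hb
          · exact absurd ((PySem.Set.mem_ofList ..).mp ((PySem.Set.contains_iff ..).mp hb)) hx
          · exact hb
        rw [hf]; simp [hx]
    by_cases hmem : volume_tier_py volume_str ∈ l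
    · simp [hmem]
    · rw [hcontains, if_neg hmem,
          if_neg (show ¬(decide (volume_tier_py volume_str ∈ l) = true) by simp [hmem]),
          score_adj_loop_eq]
      have hfun : (fun t => PySem.Set.contains (PySem.Set.ofList l) t) =
          fun t : String => decide (t ∈ l) := funext hcontains
      have hnbf : (fun t => nbrB c t) = fun t : String => decide (t ∈ nbrs c) :=
        funext (nbrB_eq_mem_nbrs hc4)
      simp only [hfun]
      rw [show (PySem.List.slice tier_order_py (some ((c : Int) - 1)) (some (c : Int)) ++
            PySem.List.slice tier_order_py (some ((c : Int) + 1)) (some ((c : Int) + 2))) =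
            nbrs c from rfl,
          ← any_mem_comm l (nbrs c), show (fun x : String => decide (x ∈ nbrs c)) =
            fun t => nbrB c t from hnbf.symm]
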